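-- pv_equiv track=rewrite | github.com/bidbirdisdead/Kcs | backend/tools/backfill_crypto.py | _group_runs
-- ===== SOURCE A (Python) =====
-- def _group_runs(ts_list: list[int], limit: int = 1000) -> list[tuple[int, int, int]]:
--     """Group sorted minute timestamps into contiguous runs.
--
--     Returns list of (start_ts, end_ts, n_minutes). Optionally splits runs larger
--     than `limit` minutes into multiple chunks to keep request sizes reasonable.
--     """
--     if not ts_list:
--         return []
--     ts_list = sorted(ts_list)
--     runs: list[tuple[int, int, int]] = []
--     start = prev = ts_list[0]
--     count = 1
--     for ts in ts_list[1:]: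
--         if ts == prev + 60 and count < limit:
--             prev = ts
--             count += 1
--             continue
--         runs.append((start, prev, (prev - start) // 60 + 1))
--         start = prev = ts
--         count = 1
--     runs.append((start, prev, (prev - start) // 60 + 1))
--     return runs
-- ===== SOURCE B (Python) =====
-- def _group_runs(ts_list: list[int], limit: int = 1000) -> list[tuple[int, int, int]]:
--     """Two-pass re-implementation: split into maximal contiguous segments,
--     then chunk each segment into slices of at most `limit` elements."""
--     if not ts_list:
--         return []
--     ts = sorted(ts_list)
--     k = limit if limit > 0 else 1  # chunk size; a non-positive limit means singleton chunks
--     # pass 1: maximal segments where consecutive elements differ by exactly 60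
--     segments = []
--     cur = [ts[0]]
--     last = ts[0]
--     for t in ts[1:]:
--         if t == last + 60:
--             cur.append(t)
--         else:
--             segments.append(cur)
--             cur = [t]
--         last = t
--     segments.append(cur)
--     # pass 2: chunk each segment and emit (first, last, minutes)
--     out = []
--     for seg in segments:
--         i = 0
--         n = len(seg)
--         while i < n:
--             chunk = seg[i:i + k]
--             out.append((chunk[0], chunk[-1], (chunk[-1] - chunk[0]) // 60 + 1))
--             i += k
--     return out
-- ===== Notes on version B (the rewrite author's own statement) =====
-- stated objective: alternative
-- what changed: A's single fused loop carrying (start, prev, count) state is replaced by a two-pass decomposition: first split the sorted list into maximal contiguous (+60) segments, then slice each segment into chunks of at most limit elements and emit (first, last, minutes) per chunk.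
import Mathlib
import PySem

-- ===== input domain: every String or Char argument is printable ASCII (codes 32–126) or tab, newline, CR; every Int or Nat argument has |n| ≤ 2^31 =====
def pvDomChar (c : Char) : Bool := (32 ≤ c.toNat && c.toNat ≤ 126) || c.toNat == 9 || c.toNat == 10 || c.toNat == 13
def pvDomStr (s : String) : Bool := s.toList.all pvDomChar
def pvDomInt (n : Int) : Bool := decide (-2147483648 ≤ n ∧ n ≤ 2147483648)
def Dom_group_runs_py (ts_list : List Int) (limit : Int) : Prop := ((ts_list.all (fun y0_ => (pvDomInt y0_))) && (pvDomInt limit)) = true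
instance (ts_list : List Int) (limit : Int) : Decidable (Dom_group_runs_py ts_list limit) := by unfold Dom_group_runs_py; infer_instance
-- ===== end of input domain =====

-- B replaces A's single fused loop by two passes (maximal contiguous segments, then chunks of at most `limit` elements); alternative decomposition, same cost.

-- ===== PORT A =====
-- the for-loop of A, carrying (runs, start, prev, count) exactly as the Python does
def grpLoopA (runs : List (Int × Int × Int)) (start prev count limit : Int) :
    List Int → List (Int × Int × Int)
  | [] => runs ++ [(start, prev, PySem.Int.floordiv (prev - start) 60 + 1)]
  | ts :: rest =>
    if ts = prev + 60 ∧ count < limit then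
      grpLoopA runs start ts (count + 1) limit rest
    else
      grpLoopA (runs ++ [(start, prev, PySem.Int.floordiv (prev - start) 60 + 1)]) ts ts 1 limit rest

def group_runs_py (ts_list : List Int) (limit : Int) : List (Int × Int × Int) :=
  match ts_list with
  | [] => []
  | _ :: _ =>
    match PySem.List.sorted ts_list (fun x => x) false with
    | [] => []   -- unreachable: sorted of a nonempty list is nonempty
    | t0 :: rest => grpLoopA [] t0 t0 1 limit rest

-- ===== PORT B =====
-- pass 1 of Source B: accumulate the maximal contiguous segments (the for-loop state is (segments, cur, last))
def grpSegs (acc : List (List Int)) (cur : List Int) (last : Int) :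
    List Int → List (List Int)
  | [] => acc ++ [cur]
  | t :: rest =>
    if t = last + 60 then grpSegs acc (cur ++ [t]) t rest
    else grpSegs (acc ++ [cur]) [t] t rest

-- pass 2 of Source B: the while-loop over chunk start indices i = 0, k, 2k, …;
-- Source B's chunk size k ≥ 1 is passed as km1 = k - 1 so that the index strictly increases
def grpChunks (km1 : Nat) (seg : List Int) (i : Nat) : List (Int × Int × Int) :=
  if _h : i < seg.length then
    match PySem.List.slice seg (some (i : Int)) (some ((i : Int) + ((km1 : Int) + 1))) with
    | [] => []   -- unreachable: i < len(seg), so the slice seg[i:i+k] is nonempty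
    | c0 :: cr =>
      (c0, (c0 :: cr).getLastD c0,
        PySem.Int.floordiv ((c0 :: cr).getLastD c0 - c0) 60 + 1) :: grpChunks km1 seg (i + (km1 + 1))
  else []
termination_by seg.length - i
decreasing_by omega

def group_runs_py_alt (ts_list : List Int) (limit : Int) : List (Int × Int × Int) :=
  match ts_list with
  | [] => []
  | _ :: _ =>
    match PySem.List.sorted ts_list (fun x => x) false with
    | [] => []   -- unreachable
    | t0 :: rest =>
      (grpSegs [] [t0] t0 rest).flatMap
        (fun seg => grpChunks ((if limit > 0 then limit else 1).toNat - 1) seg 0)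

-- ===== PRECONDITION & SPEC =====
def Spec_group_runs_py (ts_list : List Int) (limit : Int) (out : List (Int × Int × Int)) : Prop := out = group_runs_py_alt ts_list limit
instance (ts_list : List Int) (limit : Int) (out : List (Int × Int × Int)) : Decidable (Spec_group_runs_py ts_list limit out) := by unfold Spec_group_runs_py; infer_instance

-- ===== CLAIM (what is proved, stated in full; the proofs are below) =====
def Claim_equal_group_runs_py : Prop := ∀ (ts_list : List Int) (limit : Int), Dom_group_runs_py ts_list limit → Spec_group_runs_py ts_list limit (group_runs_py ts_list limit)

-- ===== LEMMAS AND PROOFS =====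

theorem fd60 (z : Int) : PySem.Int.floordiv (60 * z) 60 = z := by
  rw [PySem.Int.floordiv_eq_ediv_of_pos (by omega)]
  omega

-- accumulator-free version of A's loop
def loopA (limit start prev count : Int) : List Int → List (Int × Int × Int)
  | [] => [(start, prev, PySem.Int.floordiv (prev - start) 60 + 1)]
  | ts :: rest =>
    if ts = prev + 60 ∧ count < limit then loopA limit start ts (count + 1) rest
    else (start, prev, PySem.Int.floordiv (prev - start) 60 + 1) :: loopA limit ts ts 1 rest

theorem grpLoopA_acc (limit : Int) : ∀ (xs : List Int) (runs : List (Int × Int × Int)) (start prev count : Int),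
    grpLoopA runs start prev count limit xs = runs ++ loopA limit start prev count xs := by
  intro xs
  induction xs with
  | nil => intro runs start prev count; simp [grpLoopA, loopA]
  | cons t rest ih =>
    intro runs start prev count
    by_cases h : t = prev + 60 ∧ count < limit
    · simp [grpLoopA, loopA, h, ih]
    · simp [grpLoopA, loopA, h, ih]

-- accumulator-free version of B's segmentation pass
def segsF (cur : List Int) (last : Int) : List Int → List (List Int)
  | [] => [cur]
  | t :: rest =>
    if t = last + 60 then segsF (cur ++ [t]) t rest
    else cur :: segsF [t] t rest

theorem grpSegs_acc : ∀ (xs : List Int) (acc : List (List Int)) (cur : List Int) (last : Int),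
    grpSegs acc cur last xs = acc ++ segsF cur last xs := by
  intro xs
  induction xs with
  | nil => intro acc cur last; simp [grpSegs, segsF]
  | cons t rest ih =>
    intro acc cur last
    by_cases h : t = last + 60
    · simp [grpSegs, segsF, h, ih]
    · simp [grpSegs, segsF, h, ih]

theorem segsF_cons_pos (cur : List Int) (last t : Int) (rest : List Int) (h : t = last + 60) :
    segsF cur last (t :: rest) = segsF (cur ++ [t]) t rest := by
  simp only [segsF, if_pos h]

theorem segsF_cons_neg (cur : List Int) (last t : Int) (rest : List Int) (h : ¬ t = last + 60) :
    segsF cur last (t :: rest) = cur :: segsF [t] t rest := by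
  simp only [segsF, if_neg h]

-- the arithmetic run s, s+60, …, s+60(n-1)
def mkRun (s : Int) : Nat → List Int
  | 0 => []
  | n + 1 => s :: mkRun (s + 60) n

-- maximal prefix of xs continuing a run ending at p, plus the remainder
def takeRun (p : Int) : List Int → List Int × List Int
  | [] => ([], [])
  | t :: rest =>
    if t = p + 60 then (t :: (takeRun t rest).1, (takeRun t rest).2)
    else ([], t :: rest)

theorem takeRun_cons_pos (p t : Int) (rest : List Int) (h : t = p + 60) :
    takeRun p (t :: rest) = (t :: (takeRun t rest).1, (takeRun t rest).2) := by
  simp only [takeRun, if_pos h]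

theorem takeRun_cons_neg (p t : Int) (rest : List Int) (h : ¬ t = p + 60) :
    takeRun p (t :: rest) = ([], t :: rest) := by
  simp only [takeRun, if_neg h]

theorem takeRun_chain (p : Int) : ∀ (xs : List Int),
    p :: (takeRun p xs).1 = mkRun p ((takeRun p xs).1.length + 1) := by
  intro xs
  induction xs generalizing p with
  | nil => simp [takeRun, mkRun]
  | cons t rest ih =>
    by_cases h : t = p + 60
    · rw [takeRun_cons_pos p t rest h]
      simp only [List.length_cons]
      rw [show mkRun p ((takeRun t rest).1.length + 1 + 1)
            = p :: mkRun (p + 60) ((takeRun t rest).1.length + 1) from rfl]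
      rw [← h]
      exact congrArg (p :: ·) (ih t)
    · rw [takeRun_cons_neg p t rest h]
      simp [mkRun]

theorem segsF_takeRun : ∀ (xs : List Int) (cur : List Int) (last : Int),
    segsF cur last xs =
      (cur ++ (takeRun last xs).1) ::
        (match (takeRun last xs).2 with
         | [] => ([] : List (List Int))
         | t :: rs => segsF [t] t rs) := by
  intro xs
  induction xs with
  | nil => intro cur last; simp [segsF, takeRun]
  | cons t rest ih =>
    intro cur last
    by_cases h : t = last + 60
    · rw [segsF_cons_pos cur last t rest h, takeRun_cons_pos last t rest h]
      rw [ih (cur ++ [t]) t]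
      simp
    · rw [segsF_cons_neg cur last t rest h, takeRun_cons_neg last t rest h]
      simp

-- chunking a list into slices of km1+1 elements, with the emission fused in (B's pass 2 on a suffix)
def chunkLoop (km1 : Nat) : List Int → List (Int × Int × Int)
  | [] => []
  | h :: t =>
    (h, (h :: t.take km1).getLastD h,
      PySem.Int.floordiv ((h :: t.take km1).getLastD h - h) 60 + 1) :: chunkLoop km1 (t.drop km1)
termination_by xs => xs.length
decreasing_by simp

theorem chunkLoop_nil (km1 : Nat) : chunkLoop km1 [] = [] := by
  rw [chunkLoop.eq_def]

theorem chunkLoop_cons (km1 : Nat) (h : Int) (t : List Int) :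
    chunkLoop km1 (h :: t) =
      (h, (h :: t.take km1).getLastD h,
        PySem.Int.floordiv ((h :: t.take km1).getLastD h - h) 60 + 1) :: chunkLoop km1 (t.drop km1) := by
  rw [chunkLoop.eq_def]

theorem grpChunks_drop_aux (km1 : Nat) (seg : List Int) :
    ∀ (n i : Nat), seg.length ≤ i + n → grpChunks km1 seg i = chunkLoop km1 (seg.drop i) := by
  intro n
  induction n with
  | zero =>
    intro i h
    rw [grpChunks]
    simp only [dif_neg (show ¬ i < seg.length by omega)]
    rw [List.drop_of_length_le (by omega), chunkLoop_nil]
  | succ n ih =>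
    intro i h
    by_cases hi : i < seg.length
    · rw [grpChunks]
      simp only [dif_pos hi]
      have hslice : PySem.List.slice seg (some (i : Int)) (some ((i : Int) + ((km1 : Int) + 1)))
          = (seg.drop i).take (km1 + 1) := by
        have := PySem.List.slice_natCast_add (xs := seg) (j := i) (n := km1 + 1)
        push_cast at this ⊢
        rw [← this]
      obtain ⟨d, dt, hd⟩ : ∃ d dt, seg.drop i = d :: dt := by
        rcases hh : seg.drop i with _ | ⟨d, dt⟩
        · exfalso
          have := List.length_drop (l := seg) (i := i)
          rw [hh] at this
          simp at this
          omega
        · exact ⟨d, dt, rfl⟩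
      rw [hslice, hd]
      simp only [List.take_succ_cons]
      rw [ih (i + (km1 + 1)) (by omega)]
      have hdd : seg.drop (i + (km1 + 1)) = dt.drop km1 := by
        rw [← List.drop_drop, hd, List.drop_succ_cons]
      rw [hdd, chunkLoop_cons]
    · rw [grpChunks]
      simp only [dif_neg hi]
      rw [List.drop_of_length_le (by omega), chunkLoop_nil]

theorem grpChunks_drop (km1 : Nat) (seg : List Int) (i : Nat) :
    grpChunks km1 seg i = chunkLoop km1 (seg.drop i) :=
  grpChunks_drop_aux km1 seg seg.length i (by omega)

theorem mkRun_take (j : Nat) : ∀ (n : Nat) (s : Int), (mkRun s n).take j = mkRun s (min j n) := by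
  induction j with
  | zero => intro n s; simp [mkRun]
  | succ j ih =>
    intro n s
    cases n with
    | zero => simp [mkRun]
    | succ n => simp [mkRun, List.take_succ_cons, ih, Nat.succ_min_succ]

theorem mkRun_drop (j : Nat) : ∀ (n : Nat) (s : Int), (mkRun s n).drop j = mkRun (s + 60 * j) (n - j) := by
  induction j with
  | zero => intro n s; simp
  | succ j ih =>
    intro n s
    cases n with
    | zero => simp [mkRun]
    | succ n =>
      simp only [mkRun, List.drop_succ_cons, ih]
      congr 1
      · push_cast; ring
      · omega

theorem mkRun_getLastD (n : Nat) : ∀ (s d : Int), (mkRun s (n + 1)).getLastD d = s + 60 * n := by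
  induction n with
  | zero => intro s d; simp [mkRun]
  | succ n ih =>
    intro s d
    show (mkRun s (n + 2)).getLastD d = _
    rw [mkRun, mkRun]
    rw [show (s :: (s + 60) :: mkRun (s + 60 + 60) n).getLastD d
          = ((s + 60) :: mkRun (s + 60 + 60) n).getLastD d from by simp [List.getLastD]]
    rw [show ((s + 60) :: mkRun (s + 60 + 60) n) = mkRun (s + 60) (n + 1) from by rw [mkRun]]
    rw [ih (s + 60) d]
    push_cast; ring

-- one chunk that fits entirely (m ≤ k), emitted as (start, start+60(m-1), m)
theorem chunkLoop_small (km1 : Nat) (s : Int) (m : Nat) (h1 : 1 ≤ m) (h2 : m ≤ km1 + 1) :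
    chunkLoop km1 (mkRun s m) = [(s, s + 60 * ((m : Int) - 1), (m : Int))] := by
  obtain ⟨m', rfl⟩ : ∃ m', m = m' + 1 := ⟨m - 1, by omega⟩
  rw [show mkRun s (m' + 1) = s :: mkRun (s + 60) m' from rfl]
  rw [chunkLoop_cons]
  have htake : (mkRun (s + 60) m').take km1 = mkRun (s + 60) m' := by
    rw [mkRun_take]; congr 1; omega
  have hdrop : (mkRun (s + 60) m').drop km1 = [] := by
    rw [mkRun_drop]
    rw [show m' - km1 = 0 by omega]
    rfl
  rw [htake, hdrop, chunkLoop_nil]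
  have hlast : (s :: mkRun (s + 60) m').getLastD s = s + 60 * (m' : Int) := by
    rw [show s :: mkRun (s + 60) m' = mkRun s (m' + 1) from rfl, mkRun_getLastD]
  rw [hlast]
  rw [show s + 60 * (m' : Int) - s = 60 * (m' : Int) by ring, fd60]
  rw [show (((m' + 1 : Nat)) : Int) - 1 = (m' : Int) from by push_cast; ring]
  rw [show (((m' + 1 : Nat)) : Int) = (m' : Int) + 1 from by push_cast; ring]

-- emitted triples of the remaining segments (B's pass-2 output after the first segment)
def segsEmit (km1 : Nat) (ys : List Int) : List (Int × Int × Int) :=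
  (match ys with
   | [] => ([] : List (List Int))
   | t :: rs => segsF [t] t rs).flatMap (chunkLoop km1)

theorem segsEmit_cons (km1 : Nat) (t : Int) (rest : List Int) :
    segsEmit km1 (t :: rest)
      = chunkLoop km1 (mkRun t ((takeRun t rest).1.length + 1)) ++ segsEmit km1 (takeRun t rest).2 := by
  show (segsF [t] t rest).flatMap (chunkLoop km1) = _
  rw [segsF_takeRun rest [t] t]
  simp only [List.flatMap_cons, List.singleton_append]
  rw [takeRun_chain t rest]
  rfl

-- the core correspondence: A's loop state (start, prev = start+60(c-1), count = c) against
-- B's chunking of the current segment, chunk-aligned at `start`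
theorem aux_core (limit : Int) (km1 : Nat) (hk : (if limit > 0 then limit else 1) = (km1 : Int) + 1) :
    ∀ (xs : List Int) (start : Int) (c : Nat), 1 ≤ c → c ≤ km1 + 1 →
    loopA limit start (start + 60 * ((c : Int) - 1)) (c : Int) xs
      = chunkLoop km1 (mkRun start (c + (takeRun (start + 60 * ((c : Int) - 1)) xs).1.length))
        ++ segsEmit km1 (takeRun (start + 60 * ((c : Int) - 1)) xs).2 := by
  intro xs
  induction xs with
  | nil =>
    intro start c hc1 hc2
    simp only [loopA, takeRun, List.length_nil, Nat.add_zero]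
    rw [chunkLoop_small km1 start c hc1 hc2]
    rw [show start + 60 * ((c : Int) - 1) - start = 60 * ((c : Int) - 1) by ring, fd60]
    rw [show segsEmit km1 [] = [] from rfl, List.append_nil]
    rw [show (c : Int) - 1 + 1 = (c : Int) by ring]
  | cons t rest ih =>
    intro start c hc1 hc2
    have hcount : ((c : Int) < limit) ↔ (c < km1 + 1) := by
      by_cases hl : limit > 0
      · rw [if_pos hl] at hk; omega
      · rw [if_neg hl] at hk; omega
    by_cases ht : t = start + 60 * ((c : Int) - 1) + 60
    · by_cases hcnt : c < km1 + 1
      · -- the current chunk continues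
        have hcond : t = start + 60 * ((c : Int) - 1) + 60 ∧ (c : Int) < limit :=
          ⟨ht, hcount.mpr hcnt⟩
        simp only [loopA, if_pos hcond]
        rw [takeRun_cons_pos _ t rest ht]
        simp only [List.length_cons]
        rw [show c + ((takeRun t rest).1.length + 1) = (c + 1) + (takeRun t rest).1.length by omega]
        have hrec := ih start (c + 1) (by omega) (by omega)
        push_cast at hrec
        rw [show (c : Int) + 1 - 1 = (c : Int) by ring] at hrec
        rw [show start + 60 * (c : Int) = t by rw [ht]; ring] at hrec
        exact hrec
      · -- the chunk is full: A force-splits; B's chunkLoop cuts at the same index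
        have hceq : c = km1 + 1 := by omega
        subst hceq
        have hcond : ¬ (t = start + 60 * (((km1 + 1 : Nat) : Int) - 1) + 60 ∧ ((km1 + 1 : Nat) : Int) < limit) := by
          intro hp
          have := hcount.mp hp.2
          omega
        simp only [loopA, if_neg hcond]
        rw [takeRun_cons_pos _ t rest ht]
        simp only [List.length_cons]
        rw [show (km1 + 1) + ((takeRun t rest).1.length + 1)
              = (km1 + ((takeRun t rest).1.length + 1)) + 1 by omega]
        rw [show mkRun start ((km1 + ((takeRun t rest).1.length + 1)) + 1)
              = start :: mkRun (start + 60) (km1 + ((takeRun t rest).1.length + 1)) from rfl]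
        rw [chunkLoop_cons]
        rw [show (mkRun (start + 60) (km1 + ((takeRun t rest).1.length + 1))).take km1
              = mkRun (start + 60) km1 from by rw [mkRun_take]; congr 1; omega]
        rw [show (mkRun (start + 60) (km1 + ((takeRun t rest).1.length + 1))).drop km1
              = mkRun (start + 60 + 60 * km1) ((takeRun t rest).1.length + 1) from by
            rw [mkRun_drop]; congr 1; omega]
        rw [show (start :: mkRun (start + 60) km1).getLastD start = start + 60 * (km1 : Int) from by
            rw [show start :: mkRun (start + 60) km1 = mkRun start (km1 + 1) from rfl, mkRun_getLastD]]
        rw [show start + 60 + 60 * (km1 : Int) = t from by rw [ht]; push_cast; ring]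
        rw [show start + 60 * (km1 : Int) - start = 60 * (km1 : Int) by ring, fd60]
        rw [List.cons_append]
        have hrec := ih t 1 (by omega) (by omega)
        norm_num at hrec
        rw [show (1 : Nat) + (takeRun t rest).1.length = (takeRun t rest).1.length + 1 by omega] at hrec
        rw [hrec]
        rw [show start + 60 * (((km1 + 1 : Nat) : Int) - 1) = start + 60 * (km1 : Int) from by push_cast; ring]
        rw [show start + 60 * (km1 : Int) - start = 60 * (km1 : Int) by ring, fd60]
    · -- gap: both sides close the current segment here
      have hcond : ¬ (t = start + 60 * ((c : Int) - 1) + 60 ∧ (c : Int) < limit) := fun hp => ht hp.1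
      simp only [loopA, if_neg hcond]
      rw [takeRun_cons_neg _ t rest ht]
      simp only [List.length_nil, Nat.add_zero]
      rw [chunkLoop_small km1 start c hc1 hc2]
      rw [show start + 60 * ((c : Int) - 1) - start = 60 * ((c : Int) - 1) by ring, fd60]
      rw [segsEmit_cons km1 t rest]
      have hrec := ih t 1 (by omega) (by omega)
      norm_num at hrec
      rw [show (1 : Nat) + (takeRun t rest).1.length = (takeRun t rest).1.length + 1 by omega] at hrec
      rw [hrec, List.singleton_append]
      rw [show (c : Int) - 1 + 1 = (c : Int) by ring]

-- ===== VERDICT (by name: the statement is the Claim_ definition above) =====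
theorem group_runs_py_spec : Claim_equal_group_runs_py := by
  intro ts_list limit _
  unfold Spec_group_runs_py group_runs_py group_runs_py_alt
  cases ts_list with
  | nil => rfl
  | cons a as =>
    rcases hs : PySem.List.sorted (a :: as) (fun x => x) false with _ | ⟨t0, rest⟩
    · rfl
    · show grpLoopA [] t0 t0 1 limit rest
        = (grpSegs [] [t0] t0 rest).flatMap
            (fun seg => grpChunks ((if limit > 0 then limit else 1).toNat - 1) seg 0)
      have hk : (if limit > 0 then limit else 1)
          = (((if limit > 0 then limit else 1).toNat - 1 : Nat) : Int) + 1 := by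
        split <;> omega
      rw [grpLoopA_acc limit rest [] t0 t0 1, List.nil_append]
      rw [grpSegs_acc rest [] [t0] t0, List.nil_append]
      rw [show (fun seg => grpChunks ((if limit > 0 then limit else 1).toNat - 1) seg 0)
            = fun seg => chunkLoop ((if limit > 0 then limit else 1).toNat - 1) seg from
          funext fun seg => by rw [grpChunks_drop, List.drop_zero]]
      have hA := aux_core limit ((if limit > 0 then limit else 1).toNat - 1) hk rest t0 1
        (by omega) (by omega)
      norm_num at hA
      rw [show (1 : Nat) + (takeRun t0 rest).1.length = (takeRun t0 rest).1.length + 1 by omega] at hA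
      rw [hA]
      rw [segsF_takeRun rest [t0] t0]
      simp only [List.flatMap_cons, List.singleton_append]
      rw [takeRun_chain t0 rest]
      rfl
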